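-- pv_equiv track=rewrite | github.com/jdpmk/programming-problems | advent-of-code/2021/day10-2.py | solve
-- ===== SOURCE A (Python) =====
-- import collections
--
-- table = {
--     None: 0,
--     ')': 1,
--     ']': 2,
--     '}': 3,
--     '>': 4
-- }
--
-- complement = {
--     '(': ')',
--     '[': ']',
--     '{': '}',
--     '<': '>',
--     ')': '(',
--     ']': '[',
--     '}': '{',
--     '>': '<'
-- }
--
-- def is_close(c):
--     return c in [')', ']', '}', '>']
--
-- def first_invalid_char(chunk):
--     s = collections.deque()
--     for c in chunk:
--         if is_close(c):
--             if not s: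
--                 return c, s
--             if s.pop() != complement[c]:
--                 return c, s
--         else:
--             s.append(c)
--
--     return None, s
--
-- def solve(chunks):
--     all_points = []
--     for chunk in chunks:
--         c, s = first_invalid_char(chunk)
--         if not c:
--             complete = []
--             while s:
--                 complete.append(complement[s.pop()])
--
--             points = 0
--             for c in complete:
--                 points = points * 5 + table[c]
--             all_points.append(points)
--
--     return sorted(all_points)[len(all_points) // 2]
-- ===== SOURCE B (Python) =====
-- # B: instead of a stack machine, reduce each chunk to its normal form by
-- # repeatedly deleting matched bracket pairs; a leftover closing bracket means
-- # the line is corrupted, otherwise the leftover is exactly the unmatched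
-- # opening brackets, read in reverse for the completion score.
-- POINTS = {'(': 1, '[': 2, '{': 3, '<': 4}
--
-- def _reduce(chunk):
--     while True:
--         t = chunk.replace('()', '').replace('[]', '').replace('{}', '').replace('<>', '')
--         if t == chunk:
--             return chunk
--         chunk = t
--
-- def solve(chunks):
--     scores = []
--     for chunk in chunks:
--         r = _reduce(chunk)
--         if any(c in ')]}>' for c in r):
--             continue
--         points = 0
--         for c in reversed(r):
--             points = points * 5 + POINTS[c]
--         scores.append(points)
--     return sorted(scores)[len(scores) // 2]
-- ===== Notes on version B (the rewrite author's own statement) =====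
-- stated objective: simpler
-- what changed: Replaces the per-chunk stack machine with early mismatch return by reducing each chunk to a normal form via repeated deletion of matched bracket pairs ('()','[]','{}','<>'): a leftover closer marks a corrupted line, otherwise the leftover is the unmatched openers whose reverse gives the completion score.
import Mathlib
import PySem

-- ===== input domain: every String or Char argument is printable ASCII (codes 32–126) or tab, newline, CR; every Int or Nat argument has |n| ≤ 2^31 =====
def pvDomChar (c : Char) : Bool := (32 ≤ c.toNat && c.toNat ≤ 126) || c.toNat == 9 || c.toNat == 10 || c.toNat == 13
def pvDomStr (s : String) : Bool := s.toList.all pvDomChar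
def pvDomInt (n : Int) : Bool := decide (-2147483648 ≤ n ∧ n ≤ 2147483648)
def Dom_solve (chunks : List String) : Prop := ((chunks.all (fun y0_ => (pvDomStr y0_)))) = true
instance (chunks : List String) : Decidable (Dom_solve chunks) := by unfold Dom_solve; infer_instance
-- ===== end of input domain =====

-- B replaces A's per-chunk stack machine by repeatedly deleting matched
-- bracket pairs until a fixpoint (simpler, not faster); equal on Pre_solve.

-- ===== PORT A =====

-- is_close(c)
def isClose (c : Char) : Bool := c == ')' || c == ']' || c == '}' || c == '>'

-- complement[c]; total function version of the dict: on keys outside the dict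
-- Python raises KeyError — such lookups are excluded by Pre_solve, so the
-- default branch is never reached there.
def complementF (c : Char) : Char :=
  if c = '(' then ')' else if c = '[' then ']' else if c = '{' then '}'
  else if c = '<' then '>' else if c = ')' then '(' else if c = ']' then '['
  else if c = '}' then '{' else if c = '>' then '<' else '?'

-- table[c] for the Char keys; table[None] = 0 is never looked up by solve.
def tableF (c : Char) : Int :=
  if c = ')' then 1 else if c = ']' then 2 else if c = '}' then 3
  else if c = '>' then 4 else 0

-- first_invalid_char's loop; the deque is a list with its top at the head
-- (append = cons, pop = uncons; A pops before the mismatch comparison, so the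
-- early-return stack is st').
def fiGo : List Char → List Char → Option Char × List Char
  | [], st => (none, st)
  | c :: rest, st =>
    if isClose c then
      match st with
      | [] => (some c, st)
      | t :: st' => if t ≠ complementF c then (some c, st') else fiGo rest st'
    else fiGo rest (c :: st)

def firstInvalid (chunk : List Char) : Option Char × List Char := fiGo chunk []

def solve (chunks : List String) : Int :=
  let allPoints := chunks.foldl (fun acc chunk =>
    let cs := firstInvalid chunk.toList
    if cs.1 = none then
      -- while s: complete.append(complement[s.pop()]) — pops the top first
      let complete := cs.2.map complementF
      let points := complete.foldl (fun p c => p * 5 + tableF c) 0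
      acc ++ [points]
    else acc) []
  -- sorted(all_points)[len(all_points) // 2]; the IndexError on an empty list
  -- is excluded by Pre_solve, so the default 0 is never reached there.
  (PySem.List.pyGet? (PySem.List.sorted allPoints (fun x => x) false)
    (PySem.Int.floordiv (allPoints.length : Int) 2)).getD 0

-- ===== PORT B =====

-- POINTS[c]; a KeyError on other keys is excluded by Pre_solve.
def pointsB (c : Char) : Int :=
  if c = '(' then 1 else if c = '[' then 2 else if c = '{' then 3
  else if c = '<' then 4 else 0

-- one round of chunk.replace('()','').replace('[]','').replace('{}','').replace('<>','')
def stepB (s : List Char) : List Char :=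
  PySem.Chars.replace (PySem.Chars.replace (PySem.Chars.replace
    (PySem.Chars.replace s ['(', ')'] []) ['[', ']'] []) ['{', '}'] []) ['<', '>'] []

-- ---- facts cited by reduceB's termination proof (they must precede it) ----

-- leftmost deletion of all non-overlapping occurrences of the two-char
-- pattern a b — the List Char meaning of s.replace(a+b, '')
def repl (a b : Char) : List Char → List Char
  | x :: y :: t => if x = a ∧ y = b then repl a b t else x :: repl a b (y :: t)
  | l => l

theorem go_nil (a b : Char) (fuel : Nat) (acc : List Char) :
    PySem.Chars.replace.go [a, b] [] fuel [] acc = acc.reverse := by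
  cases fuel <;> simp [PySem.Chars.replace.go]

theorem go_eq (a b : Char) : ∀ fuel (l acc : List Char), l.length ≤ fuel →
    PySem.Chars.replace.go [a, b] [] fuel l acc = acc.reverse ++ repl a b l := by
  intro fuel
  induction fuel with
  | zero =>
    intro l acc h
    have : l = [] := List.eq_nil_of_length_eq_zero (Nat.le_zero.mp h)
    subst this
    simp [go_nil, repl]
  | succ n ih =>
    intro l acc h
    match l with
    | [] => simp [go_nil, repl]
    | [c] =>
      rw [PySem.Chars.replace.go]
      have hpre : List.isPrefixOf [a, b] [c] = false := by
        simp [List.isPrefixOf]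
      rw [hpre]
      simp only [Bool.false_eq_true, if_false, go_nil]
      simp [repl]
    | x :: y :: t =>
      rw [PySem.Chars.replace.go]
      by_cases hxy : x = a ∧ y = b
      · obtain ⟨rfl, rfl⟩ := hxy
        have hpre : List.isPrefixOf [x, y] (x :: y :: t) = true := by
          simp [List.isPrefixOf]
        rw [hpre]
        have ht : t.length ≤ n := by simp at h; omega
        simp only [if_true, List.length_cons, List.length_nil, List.drop_succ_cons,
          List.drop_zero, List.reverse_nil, List.nil_append]
        rw [ih t acc ht]
        simp [repl]
      · have hpre : List.isPrefixOf [a, b] (x :: y :: t) = false := by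
          simp [List.isPrefixOf]
          intro ha hb; exact absurd ⟨ha.symm, hb.symm⟩ hxy
        rw [hpre]
        simp only [Bool.false_eq_true, if_false]
        have hlen : (y :: t).length ≤ n := by simp at h ⊢; omega
        rw [ih (y :: t) (x :: acc) hlen]
        simp [repl, if_neg hxy]

theorem replace_eq_repl (a b : Char) (l : List Char) :
    PySem.Chars.replace l [a, b] [] = repl a b l := by
  rw [PySem.Chars.replace]
  simp
  exact go_eq a b l.length l [] le_rfl

theorem repl_length_le (a b : Char) : ∀ l : List Char, (repl a b l).length ≤ l.length := by
  intro l
  induction l using repl.induct a b with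
  | case1 x y t h ih => simp [repl, if_pos h]; omega
  | case2 x y t h ih => simp [repl, if_neg h]; simpa using ih
  | case3 l h => cases l with
    | nil => simp [repl]
    | cons x t => cases t with
      | nil => simp [repl]
      | cons y r => exact absurd rfl (h x y r)

theorem repl_eq_of_length (a b : Char) : ∀ l : List Char,
    (repl a b l).length = l.length → repl a b l = l := by
  intro l
  induction l using repl.induct a b with
  | case1 x y t h ih =>
    intro hlen
    exfalso
    have := repl_length_le a b t
    simp [repl, if_pos h] at hlen
    omega
  | case2 x y t h ih =>
    intro hlen
    simp [repl, if_neg h] at hlen ⊢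
    exact ih hlen
  | case3 l h => intro _; cases l with
    | nil => simp [repl]
    | cons x t => cases t with
      | nil => simp [repl]
      | cons y r => exact absurd rfl (h x y r)

theorem stepB_eq (s : List Char) :
    stepB s = repl '<' '>' (repl '{' '}' (repl '[' ']' (repl '(' ')' s))) := by
  simp [stepB, replace_eq_repl]

theorem stepB_len_lt (s : List Char) (h : stepB s ≠ s) : (stepB s).length < s.length := by
  rw [stepB_eq] at h ⊢
  set s1 := repl '(' ')' s with hs1
  set s2 := repl '[' ']' s1 with hs2
  set s3 := repl '{' '}' s2 with hs3
  have l1 := repl_length_le '(' ')' s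
  have l2 := repl_length_le '[' ']' s1
  have l3 := repl_length_le '{' '}' s2
  have l4 := repl_length_le '<' '>' s3
  rw [← hs1] at l1; rw [← hs2] at l2; rw [← hs3] at l3
  by_contra hlt
  have e4 : (repl '<' '>' s3).length = s3.length := by omega
  have e3 : s3.length = s2.length := by omega
  have e2 : s2.length = s1.length := by omega
  have e1 : s1.length = s.length := by omega
  have q1 : s1 = s := repl_eq_of_length _ _ s e1
  have q2 : s2 = s1 := repl_eq_of_length _ _ s1 e2
  have q3 : s3 = s2 := repl_eq_of_length _ _ s2 e3
  have q4 : repl '<' '>' s3 = s3 := repl_eq_of_length _ _ s3 e4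
  exact h (by rw [q4, q3, q2, q1])

-- _reduce(chunk): delete matched pairs until the string stops changing
def reduceB (s : List Char) : List Char :=
  let t := stepB s
  if t = s then s else reduceB t
termination_by s.length
decreasing_by exact stepB_len_lt s (by assumption)

def solve_alt (chunks : List String) : Int :=
  let scores := chunks.foldl (fun acc chunk =>
    let r := reduceB chunk.toList
    if r.any (fun c => decide (c ∈ ([')', ']', '}', '>'] : List Char))) then acc
    else acc ++ [r.reverse.foldl (fun p c => p * 5 + pointsB c) 0]) []
  (PySem.List.pyGet? (PySem.List.sorted scores (fun x => x) false)
    (PySem.Int.floordiv (scores.length : Int) 2)).getD 0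

-- ===== PRECONDITION & SPEC =====

-- helpers for Pre_solve (used by no port): cancel adjacent matched bracket
-- pairs left to right with one fold; what survives is the chunk's
-- pair-cancellation normal form (top of the leftover at the head).
def pairQ (x y : Char) : Bool :=
  (x == '(' && y == ')') || (x == '[' && y == ']') || (x == '{' && y == '}') || (x == '<' && y == '>')

def cancel1 (st : List Char) (c : Char) : List Char :=
  match st with
  | t :: st' => if pairQ t c then st' else c :: st
  | [] => [c]

def leftover (cs : List Char) : List Char := cs.foldl cancel1 []

-- Pre_solve admits exactly the inputs on which the Python A returns: some
-- chunk must be non-corrupted, i.e. its leftover after cancelling matched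
-- pairs has no closing bracket (otherwise all_points is empty and the final
-- indexing raises IndexError), and every such leftover may contain only
-- opening brackets (a leftover non-bracket character would make
-- complement[s.pop()] raise KeyError).
def Pre_solve (chunks : List String) : Prop :=
  (∃ chunk ∈ chunks, (leftover chunk.toList).all (fun c => !isClose c) = true) ∧
  (∀ chunk ∈ chunks, (leftover chunk.toList).all (fun c => !isClose c) = true →
    (leftover chunk.toList).all (fun c => (['(', '[', '{', '<'] : List Char).contains c) = true)

instance (chunks : List String) : Decidable (Pre_solve chunks) := by
  unfold Pre_solve; infer_instance

def pvWitness_solve : List String := ["([{<", "([)"]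

def Spec_solve (chunks : List String) (out : Int) : Prop := out = solve_alt chunks
instance (chunks : List String) (out : Int) : Decidable (Spec_solve chunks out) := by
  unfold Spec_solve; infer_instance

-- ===== CLAIM (what is proved, stated in full; the proofs are below) =====
def Claim_equal_solve : Prop :=
  ∀ (chunks : List String), Dom_solve chunks → Pre_solve chunks → Spec_solve chunks (solve chunks)

-- ===== LEMMAS AND PROOFS =====

theorem pairQ_close {x y : Char} (h : pairQ x y = true) : isClose y = true ∧ isClose x = false := by
  simp [pairQ] at h
  rcases h with ((⟨rfl, rfl⟩ | ⟨rfl, rfl⟩) | ⟨rfl, rfl⟩) | ⟨rfl, rfl⟩ <;> simp [isClose]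

theorem pairQ_of_not_close {x y : Char} (h : isClose y = false) : pairQ x y = false := by
  by_cases hp : pairQ x y = true
  · exact absurd (pairQ_close hp).1 (by simp [h])
  · simpa using hp

theorem pairQ_iff_complement {t c : Char} (h : isClose c = true) :
    pairQ t c = true ↔ t = complementF c := by
  simp [isClose] at h
  rcases h with ((rfl | rfl) | rfl) | rfl <;>
    simp [pairQ, complementF]

-- one pair-deletion round leaves the cancellation fold unchanged
theorem foldl_cancel1_repl {a b : Char} (hab : pairQ a b = true) :
    ∀ (l st : List Char), (repl a b l).foldl cancel1 st = l.foldl cancel1 st := by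
  intro l
  induction l using repl.induct a b with
  | case1 x y t h ih =>
    intro st
    obtain ⟨rfl, rfl⟩ := h
    rw [repl, if_pos ⟨rfl, rfl⟩]
    rw [ih st]
    have hopen : isClose x = false := (pairQ_close hab).2
    have h1 : cancel1 st x = x :: st := by
      cases st with
      | nil => rfl
      | cons t st' => simp [cancel1, pairQ_of_not_close hopen]
    have h2 : cancel1 (x :: st) y = st := by simp [cancel1, hab]
    rw [List.foldl_cons, h1, List.foldl_cons, h2]
  | case2 x y t h ih =>
    intro st
    rw [repl, if_neg h]
    simp only [List.foldl_cons]
    exact ih _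
  | case3 l h =>
    intro st
    cases l with
    | nil => simp [repl]
    | cons x t => cases t with
      | nil => simp [repl]
      | cons y r => exact absurd rfl (h x y r)

-- no adjacent occurrence of the two-char pattern a b
def noPair (a b : Char) : List Char → Bool
  | x :: y :: t => !(x = a ∧ y = b : Bool) && noPair a b (y :: t)
  | _ => true

theorem noPair_of_repl_eq (a b : Char) : ∀ l : List Char, repl a b l = l → noPair a b l = true := by
  intro l
  induction l using repl.induct a b with
  | case1 x y t h ih =>
    intro he
    exfalso
    rw [repl, if_pos h] at he
    have h1 := repl_length_le a b t
    have h2 := congrArg List.length he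
    simp at h2
    omega
  | case2 x y t h ih =>
    intro he
    rw [repl, if_neg h] at he
    simp at he
    simp [noPair, ih he]
    tauto
  | case3 l h =>
    intro _
    cases l with
    | nil => simp [noPair]
    | cons x t => cases t with
      | nil => simp [noPair]
      | cons y r => exact absurd rfl (h x y r)

-- irreducible = no adjacent matched pair of any kind
def noRedex : List Char → Bool
  | x :: y :: t => !pairQ x y && noRedex (y :: t)
  | _ => true

theorem noRedex_of_noPairs : ∀ l : List Char,
    noPair '(' ')' l = true → noPair '[' ']' l = true → noPair '{' '}' l = true →
    noPair '<' '>' l = true → noRedex l = true := by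
  intro l
  induction l with
  | nil => simp [noRedex]
  | cons x t ih =>
    cases t with
    | nil => simp [noRedex]
    | cons y r =>
      intro h1 h2 h3 h4
      simp [noPair] at h1 h2 h3 h4
      simp [noRedex, ih h1.2 h2.2 h3.2 h4.2, pairQ]
      tauto

theorem noRedex_adj : ∀ (u : List Char) (x y : Char) (v : List Char),
    noRedex (u ++ x :: y :: v) = true → pairQ x y = false := by
  intro u
  induction u with
  | nil => intro x y v h; simp [noRedex] at h; simp [h.1]
  | cons c u' ih =>
    intro x y v h
    cases u' with
    | nil =>
      simp [noRedex] at h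
      simp [h.2.1]
    | cons d u'' =>
      simp only [List.cons_append, noRedex, Bool.and_eq_true] at h
      exact ih x y v (by simpa using h.2)

-- the cancellation fold is the identity (reversed) on an irreducible string
theorem foldl_cancel1_irreducible : ∀ (cs st : List Char),
    noRedex (st.reverse ++ cs) = true → cs.foldl cancel1 st = cs.reverse ++ st := by
  intro cs
  induction cs with
  | nil => intro st _; simp
  | cons c cs' ih =>
    intro st h
    have hpush : cancel1 st c = c :: st := by
      cases st with
      | nil => rfl
      | cons t st' =>
        have : pairQ t c = false := by
          apply noRedex_adj (st'.reverse) t c cs'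
          simpa using h
        simp [cancel1, this]
    rw [List.foldl_cons, hpush]
    rw [ih (c :: st) (by simpa using h)]
    simp

theorem close_persists : ∀ (cs st : List Char) (x : Char), isClose x = true → x ∈ st →
    x ∈ cs.foldl cancel1 st := by
  intro cs
  induction cs with
  | nil => intro st x _ hx; simpa using hx
  | cons c cs' ih =>
    intro st x hcl hx
    rw [List.foldl_cons]
    apply ih
    · exact hcl
    · cases st with
      | nil => simp at hx
      | cons t st' =>
        by_cases hp : pairQ t c = true
        · have hxt : x ≠ t := by
            intro he
            rw [he] at hcl
            exact absurd hcl (by simp [(pairQ_close hp).2])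
          have hc1 : cancel1 (t :: st') c = st' := by simp [cancel1, hp]
          rw [hc1]
          rcases List.mem_cons.mp hx with rfl | hx2
          · exact absurd rfl hxt
          · exact hx2
        · have hc1 : cancel1 (t :: st') c = c :: t :: st' := by simp [cancel1, hp]
          rw [hc1]
          exact List.mem_cons_of_mem c hx

-- A's scanner against the full cancellation fold: on success the fold is the
-- scanner's stack (closer-free); on a mismatch a closer survives the fold.
theorem fiGo_run : ∀ (cs st : List Char), (∀ x ∈ st, isClose x = false) →
    (((fiGo cs st).1 = none → cs.foldl cancel1 st = (fiGo cs st).2 ∧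
        ∀ x ∈ (fiGo cs st).2, isClose x = false) ∧
     ((fiGo cs st).1 ≠ none → ∃ x ∈ cs.foldl cancel1 st, isClose x = true)) := by
  intro cs
  induction cs with
  | nil =>
    intro st hst
    constructor
    · intro _; exact ⟨by simp [fiGo], by simpa [fiGo] using hst⟩
    · intro h; simp [fiGo] at h
  | cons c rest ih =>
    intro st hst
    by_cases hcl : isClose c = true
    · cases st with
      | nil =>
        constructor
        · intro h; simp [fiGo, hcl] at h
        · intro _
          rw [List.foldl_cons]
          have : cancel1 [] c = [c] := rfl
          rw [this]
          exact ⟨c, close_persists rest [c] c hcl (by simp), hcl⟩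
      | cons t st' =>
        have hst' : ∀ x ∈ st', isClose x = false := fun x hx => hst x (by simp [hx])
        by_cases hm : t = complementF c
        · have hp : pairQ t c = true := (pairQ_iff_complement hcl).mpr hm
          have hgo : fiGo (c :: rest) (t :: st') = fiGo rest st' := by
            simp [fiGo, hcl, hm]
          have hfold : (c :: rest).foldl cancel1 (t :: st') = rest.foldl cancel1 st' := by
            simp [cancel1, hp]
          rw [hgo, hfold]
          exact ih st' hst'
        · have hp : pairQ t c = false := by
            by_cases h : pairQ t c = true
            · exact absurd ((pairQ_iff_complement hcl).mp h) hm
            · simpa using h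
          have hgo : fiGo (c :: rest) (t :: st') = (some c, st') := by
            simp [fiGo, hcl, hm]
          rw [hgo]
          constructor
          · intro h; simp at h
          · intro _
            have hfold : (c :: rest).foldl cancel1 (t :: st') =
                rest.foldl cancel1 (c :: t :: st') := by
              simp [cancel1, hp]
            rw [hfold]
            exact ⟨c, close_persists rest _ c hcl (by simp), hcl⟩
    · have hcl' : isClose c = false := by simpa using hcl
      have hgo : fiGo (c :: rest) st = fiGo rest (c :: st) := by simp [fiGo, hcl']
      have hpush : cancel1 st c = c :: st := by
        cases st with
        | nil => rfl
        | cons t st' => simp [cancel1, pairQ_of_not_close hcl']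
      have hst2 : ∀ x ∈ c :: st, isClose x = false := by
        intro x hx
        rcases hx with _ | hx
        · exact hcl'
        · exact hst x (by assumption)
      rw [hgo, List.foldl_cons, hpush]
      exact ih (c :: st) hst2

theorem stepB_fix_noRedex (s : List Char) (h : stepB s = s) : noRedex s = true := by
  rw [stepB_eq] at h
  have l1 := repl_length_le '(' ')' s
  have l2 := repl_length_le '[' ']' (repl '(' ')' s)
  have l3 := repl_length_le '{' '}' (repl '[' ']' (repl '(' ')' s))
  have l4 := repl_length_le '<' '>' (repl '{' '}' (repl '[' ']' (repl '(' ')' s)))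
  have hlen := congrArg List.length h
  have q1 : repl '(' ')' s = s := repl_eq_of_length _ _ s (by omega)
  rw [q1] at h l2 l3 l4
  have hlen2 := congrArg List.length h
  have q2 : repl '[' ']' s = s := repl_eq_of_length _ _ s (by omega)
  rw [q2] at h l3 l4
  have hlen3 := congrArg List.length h
  have q3 : repl '{' '}' s = s := repl_eq_of_length _ _ s (by omega)
  rw [q3] at h l4
  exact noRedex_of_noPairs s (noPair_of_repl_eq _ _ s q1) (noPair_of_repl_eq _ _ s q2)
    (noPair_of_repl_eq _ _ s q3) (noPair_of_repl_eq _ _ s h)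

theorem stepB_foldl (s st : List Char) : (stepB s).foldl cancel1 st = s.foldl cancel1 st := by
  rw [stepB_eq]
  rw [foldl_cancel1_repl (by decide)]
  rw [foldl_cancel1_repl (by decide)]
  rw [foldl_cancel1_repl (by decide)]
  rw [foldl_cancel1_repl (by decide)]

theorem reduceB_foldl (s st : List Char) : (reduceB s).foldl cancel1 st = s.foldl cancel1 st := by
  fun_induction reduceB s with
  | case1 s t h => rfl
  | case2 s t h ih => rw [ih]; exact stepB_foldl s st

theorem reduceB_noRedex (s : List Char) : noRedex (reduceB s) = true := by
  fun_induction reduceB s with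
  | case1 s t h => exact stepB_fix_noRedex s h
  | case2 s t h ih => exact ih

-- the reduced chunk, reversed, is the cancellation fold of the chunk
theorem reduceB_reverse (cs : List Char) : (reduceB cs).reverse = cs.foldl cancel1 [] := by
  have h1 : (reduceB cs).foldl cancel1 [] = cs.foldl cancel1 [] := reduceB_foldl cs []
  have h2 : (reduceB cs).foldl cancel1 [] = (reduceB cs).reverse ++ [] :=
    foldl_cancel1_irreducible (reduceB cs) [] (by simpa using reduceB_noRedex cs)
  rw [h2] at h1
  simpa using h1

theorem mem_decide_close (c : Char) :
    decide (c ∈ ([')', ']', '}', '>'] : List Char)) = isClose c := by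
  by_cases h1 : c = ')' <;> by_cases h2 : c = ']' <;> by_cases h3 : c = '}' <;>
    by_cases h4 : c = '>' <;> simp [isClose, h1, h2, h3, h4]

-- the two per-chunk loop bodies agree on chunks whose non-corrupted leftover
-- holds only opening brackets
theorem chunk_step_eq (acc : List Int) (chunk : String)
    (hop : (leftover chunk.toList).all (fun c => !isClose c) = true →
      (leftover chunk.toList).all (fun c => (['(', '[', '{', '<'] : List Char).contains c) = true) :
    (let cs := firstInvalid chunk.toList
     if cs.1 = none then
       let complete := cs.2.map complementF
       let points := complete.foldl (fun p c => p * 5 + tableF c) 0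
       acc ++ [points]
     else acc) =
    (let r := reduceB chunk.toList
     if r.any (fun c => decide (c ∈ ([')', ']', '}', '>'] : List Char))) then acc
     else acc ++ [r.reverse.foldl (fun p c => p * 5 + pointsB c) 0]) := by
  have hrev := reduceB_reverse chunk.toList
  have hany : (reduceB chunk.toList).any
      (fun c => decide (c ∈ ([')', ']', '}', '>'] : List Char))) =
      (reduceB chunk.toList).any isClose := by
    apply PySem.List.any_congr_mem
    intro x _
    exact mem_decide_close x
  have base := fiGo_run chunk.toList [] (by simp)
  by_cases hA : (fiGo chunk.toList []).1 = none
  · obtain ⟨hfold, hcf⟩ := base.1 hA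
    have hr : (reduceB chunk.toList).reverse = (fiGo chunk.toList []).2 := by
      rw [hrev, hfold]
    have hanyfalse : (reduceB chunk.toList).any isClose = false := by
      rw [List.any_eq_false]
      intro x hx
      have : x ∈ (reduceB chunk.toList).reverse := by simpa using hx
      rw [hr] at this
      simp [hcf x this]
    have hopen : ∀ c ∈ (fiGo chunk.toList []).2, c = '(' ∨ c = '[' ∨ c = '{' ∨ c = '<' := by
      intro c hc
      have hall := hop (by
        rw [List.all_eq_true]
        intro x hx
        rw [leftover, hfold] at hx
        simp [hcf x hx])
      rw [List.all_eq_true] at hall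
      have := hall c (by rw [leftover, hfold]; exact hc)
      simpa using this
    have hpoints : ((fiGo chunk.toList []).2.map complementF).foldl
        (fun p c => p * 5 + tableF c) 0 =
        (reduceB chunk.toList).reverse.foldl (fun p c => p * 5 + pointsB c) 0 := by
      rw [hr, List.foldl_map]
      apply PySem.List.foldl_congr_mem
      intro p x hx
      rcases hopen x hx with rfl | rfl | rfl | rfl <;> rfl
    simp only [firstInvalid]
    rw [if_pos hA, hany, hanyfalse, hpoints]
    simp
  · have hsome := base.2 hA
    obtain ⟨x, hx, hcl⟩ := hsome
    have hxr : x ∈ reduceB chunk.toList := by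
      have : x ∈ (reduceB chunk.toList).reverse := by rw [hrev]; exact hx
      simpa using this
    have hanytrue : (reduceB chunk.toList).any isClose = true :=
      List.any_eq_true.mpr ⟨x, hxr, hcl⟩
    simp only [firstInvalid]
    rw [if_neg hA, hany, hanytrue]
    simp

-- ===== VERDICT (by name: the statement is the Claim_ definition above) =====
theorem solve_spec : Claim_equal_solve := by
  unfold Claim_equal_solve
  intro chunks hdom hpre
  simp only [Spec_solve, solve, solve_alt]
  have h := PySem.List.foldl_congr_mem chunks _ _ ([] : List Int)
    (fun acc chunk hc => chunk_step_eq acc chunk (hpre.2 chunk hc))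
  rw [h]
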